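-- pv_equiv track=rewrite | github.com/banks1923/Email-Sync-Clean | tests/transcription/fix_transcription_test.py | filter_repetitions
-- ===== SOURCE A (Python) =====
-- def filter_repetitions(text):
--     """Basic repetition filtering."""
--     if not text:
--         return text
--
--     # Split into sentences
--     sentences = [s.strip() for s in text.split('.') if s.strip()]
--
--     # Remove exact duplicates and excessive repetition
--     filtered_sentences = []
--     for sentence in sentences:
--         # Skip if this exact sentence was just added
--         if filtered_sentences and sentence.lower() == filtered_sentences[-1].lower():
--             continue
--
--         # Skip sentences that are just repeated words
--         words = sentence.split()
--         if len(words) > 3 and len({word.lower() for word in words}) <= 2: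
--             continue  # Too repetitive
--
--         filtered_sentences.append(sentence)
--
--     return '. '.join(filtered_sentences).strip()
-- ===== SOURCE B (Python) =====
-- def filter_repetitions(text):
--     """Basic repetition filtering: two passes instead of one accumulator loop."""
--     if not text:
--         return text
--     sentences = [s.strip() for s in text.split('.') if s.strip()]
--     # Pass 1: drop "too repetitive" sentences (intrinsic property of each sentence).
--     kept = [s for s in sentences
--             if not (len(s.split()) > 3 and len({w.lower() for w in s.split()}) <= 2)]
--     # Pass 2: collapse runs of adjacent case-insensitive duplicates, keeping the first.
--     result = [s for prev, s in zip([None] + kept, kept)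
--               if prev is None or s.lower() != prev.lower()]
--     return '. '.join(result).strip()
-- ===== Notes on version B (the rewrite author's own statement) =====
-- stated objective: simpler
-- what changed: A's single loop that threads an accumulator and inspects its last element is replaced by two independent passes: a filter dropping intrinsically repetitive sentences, then a zip-with-previous comprehension collapsing adjacent case-insensitive duplicate runs.
import Mathlib
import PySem

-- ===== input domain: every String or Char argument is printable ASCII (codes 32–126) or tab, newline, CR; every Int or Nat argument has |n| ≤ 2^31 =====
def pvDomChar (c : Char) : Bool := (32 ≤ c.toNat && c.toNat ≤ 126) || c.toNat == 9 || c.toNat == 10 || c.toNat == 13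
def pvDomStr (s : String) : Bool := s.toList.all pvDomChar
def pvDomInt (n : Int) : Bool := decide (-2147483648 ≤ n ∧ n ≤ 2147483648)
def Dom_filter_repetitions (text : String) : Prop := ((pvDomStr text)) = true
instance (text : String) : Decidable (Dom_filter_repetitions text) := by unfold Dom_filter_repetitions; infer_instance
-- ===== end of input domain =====

-- B replaces A's single accumulator loop by two independent passes (intrinsic-repetition
-- filter, then collapse of adjacent case-insensitive duplicate runs); objective: simpler.

-- ===== PORT A =====
-- shared subexpression of both Pythons: "len(words) > 3 and len({w.lower() for w in words}) <= 2"
def pvIsRep (s : String) : Bool :=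
  let words := PySem.Str.split₀ s
  decide (3 < words.length) && decide (PySem.Set.len (PySem.Set.ofList (words.map PySem.Str.lower)) ≤ 2)

-- shared line of both Pythons: "[s.strip() for s in text.split('.') if s.strip()]"
def pvSentences (text : String) : List String :=
  (((PySem.Str.split? text ".").getD []).filter (fun s => PySem.Str.strip s ≠ "")).map PySem.Str.strip

-- A's loop body
def pvStepA (acc : List String) (sentence : String) : List String :=
  if acc ≠ [] ∧ PySem.Str.lower sentence = PySem.Str.lower (PySem.List.pyGetD acc (-1) "") then acc
  else if pvIsRep sentence then acc
  else acc ++ [sentence]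

def filter_repetitions (text : String) : String :=
  if text = "" then text
  else
    let filtered := (pvSentences text).foldl pvStepA []
    PySem.Str.strip (PySem.Str.join ". " filtered)

-- ===== PORT B =====
def filter_repetitions_alt (text : String) : String :=
  if text = "" then text
  else
    let kept := (pvSentences text).filter (fun s => !pvIsRep s)
    let result := ((List.zip ((none : Option String) :: kept.map some) kept).filter
        (fun p => decide (p.1 = none ∨ PySem.Str.lower p.2 ≠ PySem.Str.lower (p.1.getD "")))).map (·.2)
    PySem.Str.strip (PySem.Str.join ". " result)

-- ===== PRECONDITION & SPEC =====
def Spec_filter_repetitions (text : String) (out : String) : Prop := out = filter_repetitions_alt text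
instance (text : String) (out : String) : Decidable (Spec_filter_repetitions text out) := by unfold Spec_filter_repetitions; infer_instance

-- ===== CLAIM (what is proved, stated in full; the proofs are below) =====
def Claim_equal_filter_repetitions : Prop := ∀ (text : String), Dom_filter_repetitions text → Spec_filter_repetitions text (filter_repetitions text)

-- ===== LEMMAS AND PROOFS =====

-- A's interleaved result, keyed by the lowercase of the last kept sentence
def pvDedup (k : Option String) : List String → List String
  | [] => []
  | s :: t =>
      if some (PySem.Str.lower s) = k then pvDedup k t
      else if pvIsRep s then pvDedup k t
      else s :: pvDedup (some (PySem.Str.lower s)) t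

-- the same without the repetition branch
def pvDedupK (k : Option String) : List String → List String
  | [] => []
  | s :: t =>
      if some (PySem.Str.lower s) = k then pvDedupK k t
      else s :: pvDedupK (some (PySem.Str.lower s)) t

theorem pvFoldA_eq_dedup (l acc : List String) :
    l.foldl pvStepA acc = acc ++ pvDedup (acc.getLast?.map PySem.Str.lower) l := by
  induction l generalizing acc with
  | nil => simp [pvDedup]
  | cons s t ih =>
    simp only [List.foldl_cons, pvDedup]
    by_cases h1 : acc ≠ [] ∧ PySem.Str.lower s = PySem.Str.lower (PySem.List.pyGetD acc (-1) "") 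
    · obtain ⟨hne, heq⟩ := h1
      have hkey : some (PySem.Str.lower s) = acc.getLast?.map PySem.Str.lower := by
        rw [List.getLast?_eq_some_getLast hne, Option.map_some,
            PySem.List.pyGetD_neg_one acc "" hne] at *
        simp [heq]
      rw [pvStepA, if_pos ⟨hne, heq⟩, if_pos hkey, ih]
    · have hkey : ¬ some (PySem.Str.lower s) = acc.getLast?.map PySem.Str.lower := by
        intro hk
        rcases heq : acc.getLast? with _ | last
        · rw [heq] at hk; simp at hk
        · have hne : acc ≠ [] := by
            intro h; subst h; simp at heq
          rw [heq] at hk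
          simp only [Option.map_some, Option.some.injEq] at hk
          apply h1
          refine ⟨hne, ?_⟩
          rw [PySem.List.pyGetD_neg_one acc "" hne]
          rw [List.getLast?_eq_some_getLast hne] at heq
          obtain rfl : last = acc.getLast hne := by injection heq with h; exact h.symm
          simp [hk]
      rw [pvStepA, if_neg h1, if_neg hkey]
      by_cases h2 : pvIsRep s
      · rw [if_pos h2, if_pos h2, ih]
      · simp only [h2, if_false, Bool.false_eq_true]
        rw [ih]
        simp

theorem pvDedup_eq_dedupK_filter (l : List String) (k : Option String) :
    pvDedup k l = pvDedupK k (l.filter (fun s => !pvIsRep s)) := by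
  induction l generalizing k with
  | nil => simp [pvDedup, pvDedupK]
  | cons s t ih =>
    by_cases h2 : pvIsRep s
    · by_cases h1 : some (PySem.Str.lower s) = k
      · simp [pvDedup, h1, h2, ih]
      · simp [pvDedup, h1, h2, ih]
    · by_cases h1 : some (PySem.Str.lower s) = k
      · simp [pvDedup, pvDedupK, h1, h2, ih]
      · simp [pvDedup, pvDedupK, h1, h2, ih]

theorem pvZip_eq_dedupK (l : List String) (p : Option String) :
    ((List.zip (p :: l.map some) l).filter
        (fun q => decide (q.1 = none ∨ PySem.Str.lower q.2 ≠ PySem.Str.lower (q.1.getD "")))).map (·.2)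
      = pvDedupK (p.map PySem.Str.lower) l := by
  induction l generalizing p with
  | nil => simp [pvDedupK]
  | cons s t ih =>
    simp only [List.map_cons, List.zip_cons_cons, List.filter_cons, pvDedupK]
    by_cases hk : some (PySem.Str.lower s) = p.map PySem.Str.lower
    · rcases p with _ | q
      · simp at hk
      · simp only [Option.map_some, Option.some.injEq] at hk
        have : ¬ ((some q : Option String) = none ∨ PySem.Str.lower s ≠ PySem.Str.lower ((some q : Option String).getD "")) := by
          simp [hk]
        simp only [decide_eq_true_eq]
        rw [if_neg this, ih]
        simp [hk]
    · have hcond : ((p : Option String) = none ∨ PySem.Str.lower s ≠ PySem.Str.lower (p.getD "")) := by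
        rcases p with _ | q
        · exact Or.inl rfl
        · right
          intro h
          exact hk (by simp [h])
      simp only [decide_eq_true_eq]
      rw [if_pos hcond, if_neg hk, List.map_cons, ih]
      simp

-- ===== VERDICT (by name: the statement is the Claim_ definition above) =====
theorem filter_repetitions_spec : Claim_equal_filter_repetitions := by
  intro text _
  unfold Spec_filter_repetitions filter_repetitions filter_repetitions_alt
  by_cases h : text = ""
  · simp [h]
  · simp only [h, if_false]
    rw [pvFoldA_eq_dedup, pvZip_eq_dedupK]
    simp [pvDedup_eq_dedupK_filter]
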